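-- pv_equiv track=rewrite | github.com/nikitakozmin/algorithms_with_text | quick_templates_search/src/aho_corasick_with_joker.py | split_pattern
-- ===== SOURCE A (Python) =====
-- def split_pattern(pattern, wildcard):
--     subpatterns = []
--     current_sub = []
--     for i, c in enumerate(pattern):
--         if c == wildcard:
--             if current_sub:
--                 offset = i - len(current_sub)
--                 subpatterns.append((''.join(current_sub), offset))
--                 current_sub = []
--         else:
--             current_sub.append(c)
--     if current_sub:
--         offset = len(pattern) - len(current_sub)
--         subpatterns.append((''.join(current_sub), offset))
--
--     return subpatterns
-- ===== SOURCE B (Python) =====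
-- def split_pattern(pattern, wildcard):
--     res = []
--     i = 0
--     n = len(pattern)
--     while i < n:
--         if pattern[i] == wildcard:
--             i += 1
--             continue
--         k = i + 1
--         while k < n and pattern[k] != wildcard:
--             k += 1
--         res.append((''.join(pattern[i:k]), i))
--         i = k
--     return res
-- ===== Notes on version B (the rewrite author's own statement) =====
-- stated objective: alternative
-- what changed: Replaces the accumulator-buffer fold (growing a current_sub char list and flushing it at wildcards/end) by a recursive maximal-run splitter: skip wildcard chars, measure the leading non-wildcard run, emit the slice with its start index, recurse on the rest.
import Mathlib
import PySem

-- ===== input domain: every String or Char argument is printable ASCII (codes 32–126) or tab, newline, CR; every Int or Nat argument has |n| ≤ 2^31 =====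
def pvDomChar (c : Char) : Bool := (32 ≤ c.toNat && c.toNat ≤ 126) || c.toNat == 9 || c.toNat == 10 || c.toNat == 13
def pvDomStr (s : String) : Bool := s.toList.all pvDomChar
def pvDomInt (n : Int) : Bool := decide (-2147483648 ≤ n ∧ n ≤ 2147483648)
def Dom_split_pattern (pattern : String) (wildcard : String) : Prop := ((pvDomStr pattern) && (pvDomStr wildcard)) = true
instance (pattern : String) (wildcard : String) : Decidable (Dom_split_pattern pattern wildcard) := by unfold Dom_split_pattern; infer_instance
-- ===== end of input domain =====

-- B replaces A's accumulator-buffer fold by a recursive maximal-run splitter; same O(n) result, different decomposition.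

-- ===== PORT A =====
-- one step of the for-loop: state = (subpatterns, current_sub)
def splitStep (wildcard : String) (st : List (String × Int) × List Char) (ic : Int × Char) :
    List (String × Int) × List Char :=
  let (subpatterns, current_sub) := st
  let (i, c) := ic
  if String.mk [c] == wildcard then
    if current_sub ≠ [] then
      (subpatterns ++ [(String.mk current_sub, i - (current_sub.length : Int))], [])
    else (subpatterns, current_sub)
  else (subpatterns, current_sub ++ [c])

def split_pattern (pattern : String) (wildcard : String) : List (String × Int) :=
  let st := (PySem.List.enumerate pattern.toList).foldl (splitStep wildcard) ([], [])
  if st.2 ≠ [] then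
    st.1 ++ [(String.mk st.2, (pattern.toList.length : Int) - (st.2.length : Int))]
  else st.1

-- ===== PORT B =====
-- run_len from Source B: length of the maximal leading run of chars different from wildcard
def runLen (wildcard : String) : List Char → Nat
  | [] => 0
  | c :: t => if String.mk [c] == wildcard then 0 else 1 + runLen wildcard t

-- go from Source B
def altGo (wildcard : String) : List Char → Int → List (String × Int)
  | [], _ => []
  | c :: t, i =>
    if String.mk [c] == wildcard then altGo wildcard t (i + 1)
    else
      let k := 1 + runLen wildcard t
      [(String.mk (List.take k (c :: t)), i)] ++ altGo wildcard (List.drop k (c :: t)) (i + (k : Int))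
  termination_by s _ => s.length
  decreasing_by
    all_goals simp only [List.length_cons, List.length_drop]
    all_goals omega

def split_pattern_alt (pattern : String) (wildcard : String) : List (String × Int) :=
  altGo wildcard pattern.toList 0

-- ===== PRECONDITION & SPEC =====
def Spec_split_pattern (pattern : String) (wildcard : String) (out : List (String × Int)) : Prop := out = split_pattern_alt pattern wildcard
instance (pattern : String) (wildcard : String) (out : List (String × Int)) : Decidable (Spec_split_pattern pattern wildcard out) := by unfold Spec_split_pattern; infer_instance

-- ===== CLAIM (what is proved, stated in full; the proofs are below) =====
def Claim_equal_split_pattern : Prop := ∀ (pattern : String) (wildcard : String), Dom_split_pattern pattern wildcard → Spec_split_pattern pattern wildcard (split_pattern pattern wildcard)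

-- ===== LEMMAS AND PROOFS =====

-- A's loop-finalisation given pending buffer cur that started at index i - cur.length
def pend (wildcard : String) (cur : List Char) (i : Int) (l : List Char) : List (String × Int) :=
  if cur = [] then altGo wildcard l i
  else (String.mk (cur ++ List.take (runLen wildcard l) l), i - (cur.length : Int)) ::
       altGo wildcard (List.drop (runLen wildcard l) l) (i + (runLen wildcard l : Int))

lemma altGo_nil (w : String) (i : Int) : altGo w [] i = [] := by
  rw [altGo.eq_def]

lemma altGo_cons_match (w : String) (c : Char) (t : List Char) (i : Int)
    (h : (String.mk [c] == w) = true) : altGo w (c :: t) i = altGo w t (i + 1) := by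
  rw [altGo.eq_def]; simp [h]

lemma altGo_cons_nomatch (w : String) (c : Char) (t : List Char) (i : Int)
    (h : (String.mk [c] == w) = false) :
    altGo w (c :: t) i =
      (String.mk (c :: List.take (runLen w t) t), i) ::
        altGo w (List.drop (runLen w t) t) (i + 1 + (runLen w t : Int)) := by
  rw [altGo.eq_def]
  simp [h, Nat.add_comm 1 (runLen w t)]
  ring_nf

lemma main_invariant (w : String) (l : List Char) :
    ∀ (i : Int) (acc : List (String × Int)) (cur : List Char),
    (let st := (PySem.List.enumerate l i).foldl (splitStep w) (acc, cur)
     if st.2 ≠ [] then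
       st.1 ++ [(String.mk st.2, i + (l.length : Int) - (st.2.length : Int))]
     else st.1)
    = acc ++ pend w cur i l := by
  induction l with
  | nil =>
    intro i acc cur
    simp only [PySem.List.enumerate_nil, List.foldl_nil]
    by_cases hc : cur = []
    · simp [hc, pend, altGo_nil]
    · simp [hc, pend, runLen, altGo_nil]
  | cons c t ih =>
    intro i acc cur
    simp only [PySem.List.enumerate_cons, List.foldl_cons, List.length_cons]
    have e : (i + ((t.length + 1 : Nat) : Int)) = (i + 1) + (t.length : Int) := by
      push_cast; ring
    by_cases hm : (String.mk [c] == w) = true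
    · by_cases hc : cur = []
      · -- wildcard, empty buffer: state unchanged
        have hs : splitStep w (acc, cur) (i, c) = (acc, cur) := by
          simp [splitStep, hm, hc]
        rw [hs, e, ih (i + 1) acc cur, hc]
        simp [pend, altGo_cons_match w c t i hm]
      · -- wildcard, nonempty buffer: flush
        have hs : splitStep w (acc, cur) (i, c)
            = (acc ++ [(String.mk cur, i - (cur.length : Int))], []) := by
          simp [splitStep, hm, hc]
        rw [hs, e, ih (i + 1) (acc ++ [(String.mk cur, i - (cur.length : Int))]) []]
        have hr0 : runLen w (c :: t) = 0 := by simp [runLen, hm]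
        simp [pend, hc, hr0, altGo_cons_match w c t i hm]
    · -- non-wildcard: append c to buffer
      have hm' : (String.mk [c] == w) = false := by simpa using hm
      have hs : splitStep w (acc, cur) (i, c) = (acc, cur ++ [c]) := by
        simp [splitStep, hm']
      rw [hs, e, ih (i + 1) acc (cur ++ [c])]
      -- now show pend w (cur ++ [c]) (i+1) t = pend w cur i (c :: t)
      congr 1
      by_cases hc : cur = []
      · subst hc
        simp only [List.nil_append, pend, if_neg (by simp : ¬([c] = ([] : List Char)))]
        rw [altGo_cons_nomatch w c t i hm']
        simp
      · have hc2 : cur ++ [c] ≠ [] := by simp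
        simp only [pend, if_neg hc, if_neg hc2]
        have hrl : runLen w (c :: t) = 1 + runLen w t := by
          simp [runLen, hm']
        rw [hrl, Nat.add_comm 1 (runLen w t)]
        simp only [List.take_succ_cons, List.drop_succ_cons, List.cons.injEq, Prod.mk.injEq]
        refine ⟨⟨by simp, by simp⟩, ?_⟩
        congr 1
        push_cast
        ring

-- ===== VERDICT (by name: the statement is the Claim_ definition above) =====
theorem split_pattern_spec : Claim_equal_split_pattern := by
  intro pattern wildcard _
  show split_pattern pattern wildcard = split_pattern_alt pattern wildcard
  have h := main_invariant wildcard pattern.toList 0 [] []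
  simp only [pend] at h
  simpa [split_pattern, PySem.List.enumerate, split_pattern_alt] using h
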